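-- pv_equiv track=rewrite | github.com/ShawnYi5/logic_service | Initramfs.py | get_add_fns
-- ===== SOURCE A (Python) =====
-- def get_add_fns(after_list, bef_list):
--     if len(after_list) <= len(bef_list):
--         return []
--     fn_dict = {}
--     for fn in bef_list:
--         fn_dict[fn] = 1
--     ret_list = list()
--     for fn in after_list:
--         if fn_dict.get(fn) is not None:
--             del fn_dict[fn]
--         else:
--             ret_list.append(fn)
--     return ret_list
-- ===== SOURCE B (Python) =====
-- def get_add_fns(after_list, bef_list):
--     if len(after_list) <= len(bef_list):
--         return []
--     first = {}
--     for i, fn in enumerate(after_list):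
--         if fn not in first:
--             first[fn] = i
--     drop = {first[fn] for fn in set(bef_list) if fn in first}
--     return [fn for i, fn in enumerate(after_list) if i not in drop]
-- ===== Notes on version B (the rewrite author's own statement) =====
-- stated objective: alternative
-- what changed: Replaces the stateful pass that consumes entries from a shrinking dict of remaining bef elements with a stateless index-based filter: one pass records the first-occurrence index of every element, a drop-set of indices is built from set(bef_list), and the result is a pure comprehension keeping every position not in that set.
import Mathlib
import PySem

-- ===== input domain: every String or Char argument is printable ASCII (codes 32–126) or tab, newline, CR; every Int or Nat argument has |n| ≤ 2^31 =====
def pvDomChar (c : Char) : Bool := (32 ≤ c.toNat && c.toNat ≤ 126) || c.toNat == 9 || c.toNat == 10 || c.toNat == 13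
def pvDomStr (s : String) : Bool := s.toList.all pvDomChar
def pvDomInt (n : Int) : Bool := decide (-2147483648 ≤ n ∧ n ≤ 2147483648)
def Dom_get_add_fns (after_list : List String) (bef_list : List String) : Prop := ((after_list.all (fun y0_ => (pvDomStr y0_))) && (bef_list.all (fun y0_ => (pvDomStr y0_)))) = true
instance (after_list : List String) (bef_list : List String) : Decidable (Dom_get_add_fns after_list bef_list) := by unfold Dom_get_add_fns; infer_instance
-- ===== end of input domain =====

-- B replaces A's stateful consuming-dict pass with a stateless filter over precomputed
-- first-occurrence indices (objective: alternative, same asymptotic cost).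

-- ===== PORT A =====
def get_add_fns (after_list : List String) (bef_list : List String) : List String :=
  if after_list.length ≤ bef_list.length then []
  else
    let fn_dict : PySem.Dict String Int :=
      bef_list.foldl (fun d fn => d.insert fn 1) PySem.Dict.empty
    (after_list.foldl
      (fun (st : PySem.Dict String Int × List String) fn =>
        match st.1.get? fn with
        | some _ => (st.1.erase fn, st.2)
        | none => (st.1, st.2 ++ [fn])) (fn_dict, [])).2

-- ===== PORT B =====
def get_add_fns_alt (after_list : List String) (bef_list : List String) : List String :=
  if after_list.length ≤ bef_list.length then []
  else
    let first : PySem.Dict String Int :=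
      (PySem.List.enumerate after_list).foldl
        (fun d p => if d.contains p.2 then d else d.insert p.2 p.1) PySem.Dict.empty
    let drop : PySem.Set Int :=
      PySem.Set.ofList ((PySem.Set.ofList bef_list).filterMap (fun fn => first.get? fn))
    ((PySem.List.enumerate after_list).filter (fun q => !(drop.contains q.1))).map (fun q => q.2)

-- ===== PRECONDITION & SPEC =====
def Spec_get_add_fns (after_list : List String) (bef_list : List String) (out : List String) : Prop := out = get_add_fns_alt after_list bef_list
instance (after_list : List String) (bef_list : List String) (out : List String) : Decidable (Spec_get_add_fns after_list bef_list out) := by unfold Spec_get_add_fns; infer_instance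

-- ===== CLAIM (what is proved, stated in full; the proofs are below) =====
def Claim_equal_get_add_fns : Prop := ∀ (after_list : List String) (bef_list : List String), Dom_get_add_fns after_list bef_list → Spec_get_add_fns after_list bef_list (get_add_fns after_list bef_list)

-- ===== LEMMAS AND PROOFS =====

-- Common reference function: process xs with p the already-seen prefix; skip x exactly
-- when x is a bef element not yet seen.
def pvSpec (bef : List String) : List String → List String → List String
  | _, [] => []
  | p, x :: xs =>
    if x ∈ bef ∧ x ∉ p then pvSpec bef (p ++ [x]) xs
    else x :: pvSpec bef (p ++ [x]) xs

theorem pv_get?_erase (d : PySem.Dict String Int) (k y : String) :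
    (d.erase k).get? y = if y = k then none else d.get? y := by
  rcases d with ⟨items⟩
  simp only [PySem.Dict.erase, PySem.Dict.get?]
  induction items with
  | nil => simp
  | cons a rest ih =>
    rw [List.filter_cons]
    by_cases hak : a.1 = k
    · have hb : (!(a.1 == k)) = false := by simp [hak]
      rw [hb, if_neg (by decide), ih]
      by_cases hyk : y = k
      · simp [hyk]
      · rw [if_neg hyk, List.find?_cons_of_neg (by simp [hak]; exact fun h => hyk h.symm),
          if_neg hyk]
    · have hb : (!(a.1 == k)) = true := by simp [hak]
      rw [hb, if_pos rfl]
      by_cases hay : a.1 = y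
      · have hyk : ¬ y = k := fun h => hak (hay.trans h)
        rw [List.find?_cons_of_pos (by simp [hay]),
          List.find?_cons_of_pos (by simp [hay]), if_neg hyk]
      · rw [List.find?_cons_of_neg (by simp [hay]),
          List.find?_cons_of_neg (by simp [hay]), ih]

theorem pv_A_loop (bef : List String) (xs : List String) :
    ∀ (d : PySem.Dict String Int) (acc p : List String),
    (∀ y, (d.get? y).isSome = true ↔ (y ∈ bef ∧ y ∉ p)) →
    (xs.foldl
      (fun (st : PySem.Dict String Int × List String) fn =>
        match st.1.get? fn with
        | some _ => (st.1.erase fn, st.2)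
        | none => (st.1, st.2 ++ [fn])) (d, acc)).2 = acc ++ pvSpec bef p xs := by
  induction xs with
  | nil => intro d acc p _; simp [pvSpec]
  | cons x xs ih =>
    intro d acc p hd
    by_cases hx : x ∈ bef ∧ x ∉ p
    · have hs : (d.get? x).isSome = true := (hd x).mpr hx
      rcases Option.isSome_iff_exists.mp hs with ⟨v, hv⟩
      simp only [List.foldl_cons, hv]
      rw [ih (d.erase x) acc (p ++ [x]) ?_]
      · simp [pvSpec, hx]
      · intro y
        rw [pv_get?_erase]
        by_cases hyx : y = x
        · subst hyx; simp
        · simp [hyx, hd y]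
    · have hn : d.get? x = none := by
        rcases h : d.get? x with _ | v
        · rfl
        · exact absurd ((hd x).mp (by simp [h])) hx
      simp only [List.foldl_cons, hn]
      rw [ih d (acc ++ [x]) (p ++ [x]) ?_]
      · simp [pvSpec, hx]
      · intro y
        rw [hd y]
        by_cases hyx : y = x
        · subst hyx
          constructor
          · intro h; exact absurd h hx
          · rintro ⟨h1, h2⟩; exact absurd (by simp) h2
        · simp [hyx]

theorem pv_first_get (xs : List String) :
    ∀ (s : Int) (d : PySem.Dict String Int) (y : String),
    ((PySem.List.enumerate xs s).foldl
      (fun d p => if d.contains p.2 then d else d.insert p.2 p.1) d).get? y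
    = if d.contains y then d.get? y
      else if y ∈ xs then some (s + (List.idxOf y xs : Int)) else none := by
  induction xs with
  | nil =>
    intro s d y
    rw [show PySem.List.enumerate ([] : List String) s = [] from rfl]
    simp only [List.foldl_nil]
    by_cases h : d.contains y = true
    · rw [if_pos h]
    · rw [if_neg h, if_neg (by simp)]
      exact (PySem.Dict.get?_eq_none_iff_contains d y).mpr (by simpa using h)
  | cons x xs ih =>
    intro s d y
    rw [PySem.List.enumerate_cons, List.foldl_cons]
    by_cases hdx : d.contains x = true
    · rw [if_pos hdx]
      rw [ih (s + 1) d y]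
      by_cases hdy : d.contains y = true
      · simp [hdy]
      · have hyx : y ≠ x := fun h => hdy (h ▸ hdx)
        simp only [hdy, if_false, List.mem_cons, hyx, false_or]
        by_cases hmem : y ∈ xs
        · simp only [hmem, if_true, List.idxOf_cons]
          have : (x == y) = false := by simp [Ne.symm hyx]
          simp only [this, cond_false]
          congr 1
          push_cast
          ring
        · simp [hmem]
    · rw [if_neg hdx]
      rw [ih (s + 1) (d.insert x s) y]
      by_cases hyx : y = x
      · subst hyx
        simp [PySem.Dict.contains_insert_self, PySem.Dict.get?_insert_self, hdx,
          List.idxOf_cons]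
      · have h1 : (d.insert x s).contains y = d.contains y := by
          simp [PySem.Dict.contains_insert, hyx]
        have h2 : (d.insert x s).get? y = d.get? y :=
          PySem.Dict.get?_insert_of_ne d s hyx
        rw [h1, h2]
        by_cases hdy : d.contains y = true
        · simp [hdy]
        · simp only [hdy, if_false, List.mem_cons, hyx, false_or]
          by_cases hmem : y ∈ xs
          · simp only [hmem, if_true, List.idxOf_cons]
            have : (x == y) = false := by simp [Ne.symm hyx]
            simp only [this, cond_false]
            congr 1
            push_cast
            ring
          · simp [hmem]

-- first-occurrence dict of the full list, from the empty dict
theorem pv_first_get₀ (xs : List String) (y : String) :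
    ((PySem.List.enumerate xs 0).foldl
      (fun d p => if d.contains p.2 then d else d.insert p.2 p.1)
      (PySem.Dict.empty : PySem.Dict String Int)).get? y
    = if y ∈ xs then some ((List.idxOf y xs : Int)) else none := by
  rw [pv_first_get xs 0 PySem.Dict.empty y]
  simp [PySem.Dict.contains_empty]

theorem pv_drop_mem (after bef : List String) (i : Int) :
    (PySem.Set.contains
      (PySem.Set.ofList ((PySem.Set.ofList bef).filterMap
        (fun fn => ((PySem.List.enumerate after 0).foldl
          (fun d p => if d.contains p.2 then d else d.insert p.2 p.1)
          (PySem.Dict.empty : PySem.Dict String Int)).get? fn))) i) = true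
    ↔ ∃ fn, fn ∈ bef ∧ fn ∈ after ∧ (List.idxOf fn after : Int) = i := by
  rw [PySem.Set.contains_iff, PySem.Set.mem_ofList, List.mem_filterMap]
  constructor
  · rintro ⟨fn, hfn, hget⟩
    rw [PySem.Set.mem_ofList] at hfn
    rw [pv_first_get₀] at hget
    by_cases hmem : fn ∈ after
    · simp only [hmem, if_true, Option.some.injEq] at hget
      exact ⟨fn, hfn, hmem, hget⟩
    · simp [hmem] at hget
  · rintro ⟨fn, hfn, hmem, hidx⟩
    refine ⟨fn, (PySem.Set.mem_ofList bef fn).mpr hfn, ?_⟩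
    rw [pv_first_get₀]
    simp [hmem, hidx]

theorem pv_keep_iff (p xs : List String) (bef : List String) (x : String) :
    (∃ fn, fn ∈ bef ∧ fn ∈ p ++ x :: xs ∧ (List.idxOf fn (p ++ x :: xs) : Int) = (p.length : Int))
    ↔ (x ∈ bef ∧ x ∉ p) := by
  constructor
  · rintro ⟨fn, hbef, _, hidx⟩
    have hidx' : List.idxOf fn (p ++ x :: xs) = p.length := by exact_mod_cast hidx
    rw [List.idxOf_append] at hidx'
    by_cases hp : fn ∈ p
    · have : List.idxOf fn p < p.length := List.idxOf_lt_length_of_mem hp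
      simp [hp] at hidx'
      omega
    · rw [if_neg hp] at hidx'
      have h0 : List.idxOf fn (x :: xs) = 0 := by omega
      by_cases hfx : x = fn
      · exact hfx ▸ ⟨hbef, hp⟩
      · rw [List.idxOf_cons, show (x == fn) = false from beq_eq_false_iff_ne.mpr hfx] at h0
        simp at h0
  · rintro ⟨hbef, hp⟩
    refine ⟨x, hbef, by simp only [List.mem_append, List.mem_cons]; tauto, ?_⟩
    rw [List.idxOf_append, if_neg hp, List.idxOf_cons]
    simp

theorem pv_B_loop (after bef : List String) (dropS : PySem.Set Int)
    (hdrop : ∀ i, dropS.contains i = true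
      ↔ ∃ fn, fn ∈ bef ∧ fn ∈ after ∧ (List.idxOf fn after : Int) = i)
    (xs : List String) :
    ∀ (p : List String), after = p ++ xs →
    ((PySem.List.enumerate xs (p.length : Int)).filter
      (fun q => !(dropS.contains q.1))).map (fun q => q.2) = pvSpec bef p xs := by
  induction xs with
  | nil => intro p _; simp [pvSpec, PySem.List.enumerate]
  | cons x xs ih =>
    intro p hp
    rw [PySem.List.enumerate_cons, List.filter_cons]
    have hcond : dropS.contains ((p.length : Int)) = true ↔ (x ∈ bef ∧ x ∉ p) := by
      rw [hdrop]
      rw [hp]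
      exact pv_keep_iff p xs bef x
    have hlen : ((p.length : Int) + 1) = (((p ++ [x]).length : Nat) : Int) := by
      push_cast [List.length_append, List.length_cons, List.length_nil]; omega
    have hrec := ih (p ++ [x]) (by simpa using hp)
    rw [hlen]
    by_cases hx : x ∈ bef ∧ x ∉ p
    · have : dropS.contains ((p.length : Int)) = true := hcond.mpr hx
      simp only [this, Bool.not_true]
      rw [if_neg (by decide)]
      rw [hrec]
      simp [pvSpec, hx]
    · have : dropS.contains ((p.length : Int)) = false := by
        rcases h : dropS.contains ((p.length : Int)) with _ | _
        · rfl
        · exact absurd (hcond.mp h) hx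
      simp only [this, Bool.not_false]
      rw [if_pos trivial, List.map_cons]
      rw [hrec]
      simp [pvSpec, hx]

theorem pv_init_dict (bef : List String) (y : String) :
    ((bef.foldl (fun d fn => d.insert fn (1 : Int)) PySem.Dict.empty).get? y).isSome = true
    ↔ y ∈ bef := by
  rw [← PySem.Dict.contains_eq_isSome_get?, PySem.Dict.contains_iff_mem_keys,
    PySem.Dict.keys_foldl_insert]
  simp [PySem.Dict.keys_empty, PySem.Set.update, ← PySem.Set.ofList_eq_foldl,
    PySem.Set.mem_ofList]

-- ===== VERDICT (by name: the statement is the Claim_ definition above) =====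
theorem get_add_fns_spec : Claim_equal_get_add_fns := by
  intro after bef _
  unfold Spec_get_add_fns get_add_fns get_add_fns_alt
  by_cases hlen : after.length ≤ bef.length
  · simp [hlen]
  · simp only [hlen, if_false]
    have hA := pv_A_loop bef after
      (bef.foldl (fun d fn => d.insert fn (1 : Int)) PySem.Dict.empty) [] []
      (by intro y; rw [pv_init_dict]; simp)
    have hB := pv_B_loop after bef _
      (fun i => pv_drop_mem after bef i) after [] (by simp)
    simp only [List.append_nil, List.nil_append] at hA hB
    rw [hA]
    rw [show ((([] : List String).length : Int)) = 0 by simp] at hB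
    rw [hB]
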